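-- pv_equiv track=rewrite | github.com/Pulkit-Shandilya/Python-Project | Python Files/Practice Files/CodeWars/Code2.py | score_1
-- ===== SOURCE A (Python) =====
-- def score_1(dice):
--     n1,n2,n3,n4,n5,n6,sum_=0,0,0,0,0,0,0
--     for i in dice:
--         if i==1:
--             n1 += 1
--         elif i==2:
--             n2 += 1
--         elif i==3:
--             n3 +=1
--         elif i==4:
--             n4 += 1
--         elif i==5:
--             n5 += 1
--         elif i==6:
--             n6 +=1
--
--         if n1 >=3:
--             sum_ += (n1//3)*1000
--             n1-=3
--         elif n2 >=3:
--             sum_ += (n2//3)*200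
--             n2-=3
--         elif n3 >=3:
--             sum_ += (n3//3)*300
--             n3-=3
--         elif n4 >=3:
--             sum_ += (n4//3)*400
--             n4-=3
--         elif n5 >=3:
--             sum_ += (n5//3)*500
--             n5-=3
--         elif n6 >=3:
--             sum_ += (n6//3)*600
--             n6-=3
--     sum_+= (n1*100) + (n5*50)
--     return sum_
-- ===== SOURCE B (Python) =====
-- def score_1(dice):
--     counts = [0] * 7
--     for d in dice:
--         if 1 <= d <= 6:
--             counts[d] += 1
--     base = [0, 1000, 200, 300, 400, 500, 600]
--     total = sum((counts[v] // 3) * base[v] for v in range(1, 7))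
--     return total + (counts[1] % 3) * 100 + (counts[5] % 3) * 50
-- ===== Notes on version B (the rewrite author's own statement) =====
-- stated objective: simpler
-- what changed: B separates counting from scoring: one pass tallies the dice into a count table, then a closed formula adds (count//3)*base per face and the leftover 1s/5s via count%3, instead of A's interleaved per-die scoring chain with modular counter resets.
import Mathlib
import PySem

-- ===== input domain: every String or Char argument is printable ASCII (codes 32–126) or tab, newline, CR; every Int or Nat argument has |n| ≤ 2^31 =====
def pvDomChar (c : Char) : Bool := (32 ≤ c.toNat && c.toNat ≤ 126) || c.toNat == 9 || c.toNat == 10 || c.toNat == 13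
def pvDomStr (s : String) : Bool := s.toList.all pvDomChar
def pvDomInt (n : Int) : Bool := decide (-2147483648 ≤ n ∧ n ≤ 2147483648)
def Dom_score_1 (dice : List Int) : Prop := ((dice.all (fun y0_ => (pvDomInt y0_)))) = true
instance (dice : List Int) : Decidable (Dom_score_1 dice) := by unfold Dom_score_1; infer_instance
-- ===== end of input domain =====

-- B separates counting from scoring: one pass tallies the dice into a count table, then a closed formula adds (count//3)*base per face and the leftover 1s/5s, instead of A's interleaved per-die scoring with counter resets.

-- ===== PORT A =====
-- the scoring elif chain of A's loop body: score and reset the first counter that reached 3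
def score_1Step (n1 n2 n3 n4 n5 n6 s : Int) : Int × Int × Int × Int × Int × Int × Int :=
  if n1 ≥ 3 then (n1 - 3, n2, n3, n4, n5, n6, s + (PySem.Int.floordiv n1 3) * 1000)
  else if n2 ≥ 3 then (n1, n2 - 3, n3, n4, n5, n6, s + (PySem.Int.floordiv n2 3) * 200)
  else if n3 ≥ 3 then (n1, n2, n3 - 3, n4, n5, n6, s + (PySem.Int.floordiv n3 3) * 300)
  else if n4 ≥ 3 then (n1, n2, n3, n4 - 3, n5, n6, s + (PySem.Int.floordiv n4 3) * 400)
  else if n5 ≥ 3 then (n1, n2, n3, n4, n5 - 3, n6, s + (PySem.Int.floordiv n5 3) * 500)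
  else if n6 ≥ 3 then (n1, n2, n3, n4, n5, n6 - 3, s + (PySem.Int.floordiv n6 3) * 600)
  else (n1, n2, n3, n4, n5, n6, s)

-- A's loop: increment the counter matching the die (the if/elif equality chain: at most one
-- condition can hold, written as independent ifs), then run the scoring chain, and recurse
def score_1Go : List Int → Int → Int → Int → Int → Int → Int → Int → Int × Int × Int × Int × Int × Int × Int
  | [], n1, n2, n3, n4, n5, n6, s => (n1, n2, n3, n4, n5, n6, s)
  | i :: rest, n1, n2, n3, n4, n5, n6, s =>
    match score_1Step (if i = 1 then n1 + 1 else n1) (if i = 2 then n2 + 1 else n2)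
        (if i = 3 then n3 + 1 else n3) (if i = 4 then n4 + 1 else n4)
        (if i = 5 then n5 + 1 else n5) (if i = 6 then n6 + 1 else n6) s with
    | (m1, m2, m3, m4, m5, m6, s') => score_1Go rest m1 m2 m3 m4 m5 m6 s'

def score_1 (dice : List Int) : Int :=
  match score_1Go dice 0 0 0 0 0 0 0 with
  | (n1, _, _, _, n5, _, s) => s + (n1 * 100 + n5 * 50)

-- ===== PORT B =====
-- counting pass of Source B: counts[d] += 1 for 1 ≤ d ≤ 6
def score_1Counts : List Int → Int × Int × Int × Int × Int × Int → Int × Int × Int × Int × Int × Int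
  | [], cs => cs
  | d :: rest, (c1, c2, c3, c4, c5, c6) =>
    score_1Counts rest
      (if d = 1 then (c1 + 1, c2, c3, c4, c5, c6)
       else if d = 2 then (c1, c2 + 1, c3, c4, c5, c6)
       else if d = 3 then (c1, c2, c3 + 1, c4, c5, c6)
       else if d = 4 then (c1, c2, c3, c4 + 1, c5, c6)
       else if d = 5 then (c1, c2, c3, c4, c5 + 1, c6)
       else if d = 6 then (c1, c2, c3, c4, c5, c6 + 1)
       else (c1, c2, c3, c4, c5, c6))

def score_1_alt (dice : List Int) : Int :=
  match score_1Counts dice (0, 0, 0, 0, 0, 0) with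
  | (c1, c2, c3, c4, c5, c6) =>
    (PySem.Int.floordiv c1 3) * 1000 + (PySem.Int.floordiv c2 3) * 200 +
    (PySem.Int.floordiv c3 3) * 300 + (PySem.Int.floordiv c4 3) * 400 +
    (PySem.Int.floordiv c5 3) * 500 + (PySem.Int.floordiv c6 3) * 600 +
    (PySem.Int.mod c1 3) * 100 + (PySem.Int.mod c5 3) * 50

-- ===== PRECONDITION & SPEC =====
def Spec_score_1 (dice : List Int) (out : Int) : Prop := out = score_1_alt dice
instance (dice : List Int) (out : Int) : Decidable (Spec_score_1 dice out) := by unfold Spec_score_1; infer_instance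

-- ===== CLAIM (what is proved, stated in full; the proofs are below) =====
def Claim_equal_score_1 : Prop := ∀ (dice : List Int), Dom_score_1 dice → Spec_score_1 dice (score_1 dice)

-- ===== LEMMAS AND PROOFS =====

lemma score_1Counts_spec : ∀ (l : List Int) (c1 c2 c3 c4 c5 c6 : Int),
    score_1Counts l (c1, c2, c3, c4, c5, c6) =
      (c1 + (l.count 1 : Int), c2 + (l.count 2 : Int), c3 + (l.count 3 : Int),
       c4 + (l.count 4 : Int), c5 + (l.count 5 : Int), c6 + (l.count 6 : Int)) := by
  intro l
  induction l with
  | nil => intro c1 c2 c3 c4 c5 c6; simp [score_1Counts]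
  | cons d rest ih =>
    intro c1 c2 c3 c4 c5 c6
    show score_1Counts rest _ = _
    split_ifs with h1 h2 h3 h4 h5 h6 <;>
      rw [ih] <;>
      simp only [List.count_cons, Prod.mk.injEq] <;>
      refine ⟨?_, ?_, ?_, ?_, ?_, ?_⟩ <;>
      simp [*] <;> omega

lemma score_1Step_miss (n1 n2 n3 n4 n5 n6 s : Int)
    (h1 : n1 ≤ 2) (h2 : n2 ≤ 2) (h3 : n3 ≤ 2) (h4 : n4 ≤ 2) (h5 : n5 ≤ 2) (h6 : n6 ≤ 2) :
    score_1Step n1 n2 n3 n4 n5 n6 s = (n1, n2, n3, n4, n5, n6, s) := by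
  unfold score_1Step
  rw [if_neg (by omega), if_neg (by omega), if_neg (by omega), if_neg (by omega),
      if_neg (by omega), if_neg (by omega)]

lemma fd33 : (PySem.Int.floordiv 3 3) = 1 := by
  rw [PySem.Int.floordiv_eq_ediv_of_pos (by omega)]; decide

lemma score_1Step_hit1 (n2 n3 n4 n5 n6 s : Int) :
    score_1Step 3 n2 n3 n4 n5 n6 s = (0, n2, n3, n4, n5, n6, s + 1000) := by
  unfold score_1Step; rw [if_pos (by omega), fd33]; norm_num

lemma score_1Step_hit2 (n1 n3 n4 n5 n6 s : Int) (h1 : n1 ≤ 2) :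
    score_1Step n1 3 n3 n4 n5 n6 s = (n1, 0, n3, n4, n5, n6, s + 200) := by
  unfold score_1Step; rw [if_neg (by omega), if_pos (by omega), fd33]; norm_num

lemma score_1Step_hit3 (n1 n2 n4 n5 n6 s : Int) (h1 : n1 ≤ 2) (h2 : n2 ≤ 2) :
    score_1Step n1 n2 3 n4 n5 n6 s = (n1, n2, 0, n4, n5, n6, s + 300) := by
  unfold score_1Step; rw [if_neg (by omega), if_neg (by omega), if_pos (by omega), fd33]; norm_num

lemma score_1Step_hit4 (n1 n2 n3 n5 n6 s : Int) (h1 : n1 ≤ 2) (h2 : n2 ≤ 2) (h3 : n3 ≤ 2) :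
    score_1Step n1 n2 n3 3 n5 n6 s = (n1, n2, n3, 0, n5, n6, s + 400) := by
  unfold score_1Step
  rw [if_neg (by omega), if_neg (by omega), if_neg (by omega), if_pos (by omega), fd33]; norm_num

lemma score_1Step_hit5 (n1 n2 n3 n4 n6 s : Int) (h1 : n1 ≤ 2) (h2 : n2 ≤ 2) (h3 : n3 ≤ 2) (h4 : n4 ≤ 2) :
    score_1Step n1 n2 n3 n4 3 n6 s = (n1, n2, n3, n4, 0, n6, s + 500) := by
  unfold score_1Step
  rw [if_neg (by omega), if_neg (by omega), if_neg (by omega), if_neg (by omega),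
      if_pos (by omega), fd33]; norm_num

lemma score_1Step_hit6 (n1 n2 n3 n4 n5 s : Int) (h1 : n1 ≤ 2) (h2 : n2 ≤ 2) (h3 : n3 ≤ 2) (h4 : n4 ≤ 2) (h5 : n5 ≤ 2) :
    score_1Step n1 n2 n3 n4 n5 3 s = (n1, n2, n3, n4, n5, 0, s + 600) := by
  unfold score_1Step
  rw [if_neg (by omega), if_neg (by omega), if_neg (by omega), if_neg (by omega),
      if_neg (by omega), if_pos (by omega), fd33]; norm_num

lemma score_1Go_spec : ∀ (l : List Int) (n1 n2 n3 n4 n5 n6 s : Int),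
    0 ≤ n1 → n1 ≤ 2 → 0 ≤ n2 → n2 ≤ 2 → 0 ≤ n3 → n3 ≤ 2 →
    0 ≤ n4 → n4 ≤ 2 → 0 ≤ n5 → n5 ≤ 2 → 0 ≤ n6 → n6 ≤ 2 →
    score_1Go l n1 n2 n3 n4 n5 n6 s =
      ((n1 + (l.count 1 : Int)) % 3, (n2 + (l.count 2 : Int)) % 3,
       (n3 + (l.count 3 : Int)) % 3, (n4 + (l.count 4 : Int)) % 3,
       (n5 + (l.count 5 : Int)) % 3, (n6 + (l.count 6 : Int)) % 3,
       s + ((n1 + (l.count 1 : Int)) / 3) * 1000 + ((n2 + (l.count 2 : Int)) / 3) * 200 +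
           ((n3 + (l.count 3 : Int)) / 3) * 300 + ((n4 + (l.count 4 : Int)) / 3) * 400 +
           ((n5 + (l.count 5 : Int)) / 3) * 500 + ((n6 + (l.count 6 : Int)) / 3) * 600) := by
  intro l
  induction l with
  | nil =>
    intro n1 n2 n3 n4 n5 n6 s h1 h1' h2 h2' h3 h3' h4 h4' h5 h5' h6 h6'
    simp only [score_1Go, List.count_nil, Nat.cast_zero, add_zero, Prod.mk.injEq]
    refine ⟨by omega, by omega, by omega, by omega, by omega, by omega, by omega⟩
  | cons i rest ih =>
    intro n1 n2 n3 n4 n5 n6 s h1 h1' h2 h2' h3 h3' h4 h4' h5 h5' h6 h6'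
    show (match score_1Step _ _ _ _ _ _ s with
          | (m1, m2, m3, m4, m5, m6, s') => score_1Go rest m1 m2 m3 m4 m5 m6 s') = _
    by_cases e1 : i = 1
    · subst e1
      rw [if_pos rfl, if_neg (by norm_num), if_neg (by norm_num), if_neg (by norm_num),
          if_neg (by norm_num), if_neg (by norm_num)]
      by_cases hn : n1 = 2
      · rw [show n1 + 1 = 3 by omega, score_1Step_hit1]
        dsimp only
        rw [ih _ _ _ _ _ _ _ (by omega) (by omega) h2 h2' h3 h3' h4 h4' h5 h5' h6 h6']
        simp only [List.count_cons_self, List.count_cons_of_ne (by norm_num : (1:Int) ≠ 2),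
          List.count_cons_of_ne (by norm_num : (1:Int) ≠ 3),
          List.count_cons_of_ne (by norm_num : (1:Int) ≠ 4),
          List.count_cons_of_ne (by norm_num : (1:Int) ≠ 5),
          List.count_cons_of_ne (by norm_num : (1:Int) ≠ 6), Prod.mk.injEq]
        refine ⟨?_, ?_, ?_, ?_, ?_, ?_, ?_⟩ <;> push_cast <;> omega
      · rw [score_1Step_miss _ _ _ _ _ _ _ (by omega) h2' h3' h4' h5' h6']
        dsimp only
        rw [ih _ _ _ _ _ _ _ (by omega) (by omega) h2 h2' h3 h3' h4 h4' h5 h5' h6 h6']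
        simp only [List.count_cons_self, List.count_cons_of_ne (by norm_num : (1:Int) ≠ 2),
          List.count_cons_of_ne (by norm_num : (1:Int) ≠ 3),
          List.count_cons_of_ne (by norm_num : (1:Int) ≠ 4),
          List.count_cons_of_ne (by norm_num : (1:Int) ≠ 5),
          List.count_cons_of_ne (by norm_num : (1:Int) ≠ 6), Prod.mk.injEq]
        refine ⟨?_, ?_, ?_, ?_, ?_, ?_, ?_⟩ <;> push_cast <;> omega
    · by_cases e2 : i = 2
      · subst e2
        rw [if_neg (by norm_num), if_pos rfl, if_neg (by norm_num), if_neg (by norm_num), if_neg (by norm_num), if_neg (by norm_num)]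
        by_cases hn : n2 = 2
        · rw [show n2 + 1 = 3 by omega, score_1Step_hit2 _ _ _ _ _ _ (by omega)]
          dsimp only
          rw [ih _ _ _ _ _ _ _ (by omega) (by omega) (by omega) (by omega) (by omega) (by omega) (by omega) (by omega) (by omega) (by omega) (by omega) (by omega)]
          simp only [List.count_cons_self, List.count_cons_of_ne (by norm_num : (2:Int) ≠ 1), List.count_cons_of_ne (by norm_num : (2:Int) ≠ 3), List.count_cons_of_ne (by norm_num : (2:Int) ≠ 4), List.count_cons_of_ne (by norm_num : (2:Int) ≠ 5), List.count_cons_of_ne (by norm_num : (2:Int) ≠ 6), Prod.mk.injEq]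
          refine ⟨?_, ?_, ?_, ?_, ?_, ?_, ?_⟩ <;> push_cast <;> omega
        · rw [score_1Step_miss _ _ _ _ _ _ _ (by omega) (by omega) (by omega) (by omega) (by omega) (by omega)]
          dsimp only
          rw [ih _ _ _ _ _ _ _ (by omega) (by omega) (by omega) (by omega) (by omega) (by omega) (by omega) (by omega) (by omega) (by omega) (by omega) (by omega)]
          simp only [List.count_cons_self, List.count_cons_of_ne (by norm_num : (2:Int) ≠ 1), List.count_cons_of_ne (by norm_num : (2:Int) ≠ 3), List.count_cons_of_ne (by norm_num : (2:Int) ≠ 4), List.count_cons_of_ne (by norm_num : (2:Int) ≠ 5), List.count_cons_of_ne (by norm_num : (2:Int) ≠ 6), Prod.mk.injEq]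
          refine ⟨?_, ?_, ?_, ?_, ?_, ?_, ?_⟩ <;> push_cast <;> omega
      · by_cases e3 : i = 3
        · subst e3
          rw [if_neg (by norm_num), if_neg (by norm_num), if_pos rfl, if_neg (by norm_num), if_neg (by norm_num), if_neg (by norm_num)]
          by_cases hn : n3 = 2
          · rw [show n3 + 1 = 3 by omega, score_1Step_hit3 _ _ _ _ _ _ (by omega) (by omega)]
            dsimp only
            rw [ih _ _ _ _ _ _ _ (by omega) (by omega) (by omega) (by omega) (by omega) (by omega) (by omega) (by omega) (by omega) (by omega) (by omega) (by omega)]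
            simp only [List.count_cons_self, List.count_cons_of_ne (by norm_num : (3:Int) ≠ 1), List.count_cons_of_ne (by norm_num : (3:Int) ≠ 2), List.count_cons_of_ne (by norm_num : (3:Int) ≠ 4), List.count_cons_of_ne (by norm_num : (3:Int) ≠ 5), List.count_cons_of_ne (by norm_num : (3:Int) ≠ 6), Prod.mk.injEq]
            refine ⟨?_, ?_, ?_, ?_, ?_, ?_, ?_⟩ <;> push_cast <;> omega
          · rw [score_1Step_miss _ _ _ _ _ _ _ (by omega) (by omega) (by omega) (by omega) (by omega) (by omega)]
            dsimp only
            rw [ih _ _ _ _ _ _ _ (by omega) (by omega) (by omega) (by omega) (by omega) (by omega) (by omega) (by omega) (by omega) (by omega) (by omega) (by omega)]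
            simp only [List.count_cons_self, List.count_cons_of_ne (by norm_num : (3:Int) ≠ 1), List.count_cons_of_ne (by norm_num : (3:Int) ≠ 2), List.count_cons_of_ne (by norm_num : (3:Int) ≠ 4), List.count_cons_of_ne (by norm_num : (3:Int) ≠ 5), List.count_cons_of_ne (by norm_num : (3:Int) ≠ 6), Prod.mk.injEq]
            refine ⟨?_, ?_, ?_, ?_, ?_, ?_, ?_⟩ <;> push_cast <;> omega
        · by_cases e4 : i = 4
          · subst e4
            rw [if_neg (by norm_num), if_neg (by norm_num), if_neg (by norm_num), if_pos rfl, if_neg (by norm_num), if_neg (by norm_num)]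
            by_cases hn : n4 = 2
            · rw [show n4 + 1 = 3 by omega, score_1Step_hit4 _ _ _ _ _ _ (by omega) (by omega) (by omega)]
              dsimp only
              rw [ih _ _ _ _ _ _ _ (by omega) (by omega) (by omega) (by omega) (by omega) (by omega) (by omega) (by omega) (by omega) (by omega) (by omega) (by omega)]
              simp only [List.count_cons_self, List.count_cons_of_ne (by norm_num : (4:Int) ≠ 1), List.count_cons_of_ne (by norm_num : (4:Int) ≠ 2), List.count_cons_of_ne (by norm_num : (4:Int) ≠ 3), List.count_cons_of_ne (by norm_num : (4:Int) ≠ 5), List.count_cons_of_ne (by norm_num : (4:Int) ≠ 6), Prod.mk.injEq]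
              refine ⟨?_, ?_, ?_, ?_, ?_, ?_, ?_⟩ <;> push_cast <;> omega
            · rw [score_1Step_miss _ _ _ _ _ _ _ (by omega) (by omega) (by omega) (by omega) (by omega) (by omega)]
              dsimp only
              rw [ih _ _ _ _ _ _ _ (by omega) (by omega) (by omega) (by omega) (by omega) (by omega) (by omega) (by omega) (by omega) (by omega) (by omega) (by omega)]
              simp only [List.count_cons_self, List.count_cons_of_ne (by norm_num : (4:Int) ≠ 1), List.count_cons_of_ne (by norm_num : (4:Int) ≠ 2), List.count_cons_of_ne (by norm_num : (4:Int) ≠ 3), List.count_cons_of_ne (by norm_num : (4:Int) ≠ 5), List.count_cons_of_ne (by norm_num : (4:Int) ≠ 6), Prod.mk.injEq]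
              refine ⟨?_, ?_, ?_, ?_, ?_, ?_, ?_⟩ <;> push_cast <;> omega
          · by_cases e5 : i = 5
            · subst e5
              rw [if_neg (by norm_num), if_neg (by norm_num), if_neg (by norm_num), if_neg (by norm_num), if_pos rfl, if_neg (by norm_num)]
              by_cases hn : n5 = 2
              · rw [show n5 + 1 = 3 by omega, score_1Step_hit5 _ _ _ _ _ _ (by omega) (by omega) (by omega) (by omega)]
                dsimp only
                rw [ih _ _ _ _ _ _ _ (by omega) (by omega) (by omega) (by omega) (by omega) (by omega) (by omega) (by omega) (by omega) (by omega) (by omega) (by omega)]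
                simp only [List.count_cons_self, List.count_cons_of_ne (by norm_num : (5:Int) ≠ 1), List.count_cons_of_ne (by norm_num : (5:Int) ≠ 2), List.count_cons_of_ne (by norm_num : (5:Int) ≠ 3), List.count_cons_of_ne (by norm_num : (5:Int) ≠ 4), List.count_cons_of_ne (by norm_num : (5:Int) ≠ 6), Prod.mk.injEq]
                refine ⟨?_, ?_, ?_, ?_, ?_, ?_, ?_⟩ <;> push_cast <;> omega
              · rw [score_1Step_miss _ _ _ _ _ _ _ (by omega) (by omega) (by omega) (by omega) (by omega) (by omega)]
                dsimp only
                rw [ih _ _ _ _ _ _ _ (by omega) (by omega) (by omega) (by omega) (by omega) (by omega) (by omega) (by omega) (by omega) (by omega) (by omega) (by omega)]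
                simp only [List.count_cons_self, List.count_cons_of_ne (by norm_num : (5:Int) ≠ 1), List.count_cons_of_ne (by norm_num : (5:Int) ≠ 2), List.count_cons_of_ne (by norm_num : (5:Int) ≠ 3), List.count_cons_of_ne (by norm_num : (5:Int) ≠ 4), List.count_cons_of_ne (by norm_num : (5:Int) ≠ 6), Prod.mk.injEq]
                refine ⟨?_, ?_, ?_, ?_, ?_, ?_, ?_⟩ <;> push_cast <;> omega
            · by_cases e6 : i = 6
              · subst e6
                rw [if_neg (by norm_num), if_neg (by norm_num), if_neg (by norm_num), if_neg (by norm_num), if_neg (by norm_num), if_pos rfl]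
                by_cases hn : n6 = 2
                · rw [show n6 + 1 = 3 by omega, score_1Step_hit6 _ _ _ _ _ _ (by omega) (by omega) (by omega) (by omega) (by omega)]
                  dsimp only
                  rw [ih _ _ _ _ _ _ _ (by omega) (by omega) (by omega) (by omega) (by omega) (by omega) (by omega) (by omega) (by omega) (by omega) (by omega) (by omega)]
                  simp only [List.count_cons_self, List.count_cons_of_ne (by norm_num : (6:Int) ≠ 1), List.count_cons_of_ne (by norm_num : (6:Int) ≠ 2), List.count_cons_of_ne (by norm_num : (6:Int) ≠ 3), List.count_cons_of_ne (by norm_num : (6:Int) ≠ 4), List.count_cons_of_ne (by norm_num : (6:Int) ≠ 5), Prod.mk.injEq]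
                  refine ⟨?_, ?_, ?_, ?_, ?_, ?_, ?_⟩ <;> push_cast <;> omega
                · rw [score_1Step_miss _ _ _ _ _ _ _ (by omega) (by omega) (by omega) (by omega) (by omega) (by omega)]
                  dsimp only
                  rw [ih _ _ _ _ _ _ _ (by omega) (by omega) (by omega) (by omega) (by omega) (by omega) (by omega) (by omega) (by omega) (by omega) (by omega) (by omega)]
                  simp only [List.count_cons_self, List.count_cons_of_ne (by norm_num : (6:Int) ≠ 1), List.count_cons_of_ne (by norm_num : (6:Int) ≠ 2), List.count_cons_of_ne (by norm_num : (6:Int) ≠ 3), List.count_cons_of_ne (by norm_num : (6:Int) ≠ 4), List.count_cons_of_ne (by norm_num : (6:Int) ≠ 5), Prod.mk.injEq]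
                  refine ⟨?_, ?_, ?_, ?_, ?_, ?_, ?_⟩ <;> push_cast <;> omega
              · rw [if_neg e1, if_neg e2, if_neg e3, if_neg e4, if_neg e5, if_neg e6]
                rw [score_1Step_miss _ _ _ _ _ _ _ (by omega) (by omega) (by omega) (by omega) (by omega) (by omega)]
                dsimp only
                rw [ih _ _ _ _ _ _ _ (by omega) (by omega) (by omega) (by omega) (by omega) (by omega) (by omega) (by omega) (by omega) (by omega) (by omega) (by omega)]
                simp only [List.count_cons_of_ne e1, List.count_cons_of_ne e2, List.count_cons_of_ne e3, List.count_cons_of_ne e4, List.count_cons_of_ne e5, List.count_cons_of_ne e6]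

-- ===== VERDICT (by name: the statement is the Claim_ definition above) =====
theorem score_1_spec : Claim_equal_score_1 := by
  intro dice _
  unfold Spec_score_1 score_1 score_1_alt
  rw [score_1Go_spec _ _ _ _ _ _ _ _ le_rfl (by omega) le_rfl (by omega) le_rfl (by omega)
      le_rfl (by omega) le_rfl (by omega) le_rfl (by omega)]
  rw [score_1Counts_spec]
  simp only [zero_add]
  rw [PySem.Int.floordiv_eq_ediv_of_pos (by omega), PySem.Int.floordiv_eq_ediv_of_pos (by omega),
      PySem.Int.floordiv_eq_ediv_of_pos (by omega), PySem.Int.floordiv_eq_ediv_of_pos (by omega),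
      PySem.Int.floordiv_eq_ediv_of_pos (by omega), PySem.Int.floordiv_eq_ediv_of_pos (by omega),
      PySem.Int.mod_eq_emod_of_pos (by omega), PySem.Int.mod_eq_emod_of_pos (by omega)]
  ring
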